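-- pv_equiv track=rewrite | github.com/d4rkbl4de/CodeMarshal | core/search/semantic_search.py | extract_code_chunks
-- ===== SOURCE A (Python) =====
-- def extract_code_chunks(
--     content: str,
--     chunk_size: int = 50,
--     overlap: int = 10,
-- ) -> list[tuple[int, str]]:
--     """
--     Extract overlapping code chunks with line numbers.
--
--     Args:
--         content: Source code content
--         chunk_size: Lines per chunk
--         overlap: Overlapping lines between chunks
--
--     Returns:
--         List of (start_line, chunk_text) tuples
--     """
--     lines = content.splitlines()
--     chunks = []
--
--     if len(lines) <= chunk_size:
--         # Small file - one chunk
--         return [(1, content)]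
--
--     step = chunk_size - overlap
--     for i in range(0, len(lines), step):
--         chunk_lines = lines[i : i + chunk_size]
--         chunk_text = "\n".join(chunk_lines)
--         chunks.append((i + 1, chunk_text))
--
--     return chunks
-- ===== SOURCE B (Python) =====
-- def extract_code_chunks(
--     content: str,
--     chunk_size: int = 50,
--     overlap: int = 10,
-- ) -> list[tuple[int, str]]:
--     """Chunk by slicing one normalized buffer via a prefix-offset table
--     instead of joining a fresh list slice per chunk."""
--     lines = content.splitlines()
--     n = len(lines)
--
--     if n <= chunk_size:
--         return [(1, content)]
--
--     # offsets[k] = start position of line k inside "\n".join(lines)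
--     offsets = []
--     pos = 0
--     for ln in lines:
--         offsets.append(pos)
--         pos += len(ln) + 1
--     offsets.append(pos)
--
--     norm = "\n".join(lines)
--     step = chunk_size - overlap
--     chunks = []
--     for i in range(0, n, step):
--         hi = min(i + chunk_size, n)
--         if hi <= i:
--             chunks.append((i + 1, ""))
--         else:
--             chunks.append((i + 1, norm[offsets[i] : offsets[hi] - 1]))
--     return chunks
-- ===== Notes on version B (the rewrite author's own statement) =====
-- stated objective: alternative
-- what changed: B joins the lines once into a normalized buffer and precomputes a prefix-offset table, producing each chunk as a single substring slice instead of re-joining a fresh list slice per chunk.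
-- outside the precondition, e.g. on extract_code_chunks('a\nb\nc\nd', -2, -5): A returns [(1, 'a\nb'), (4, '')], B returns [(1, ''), (4, '')]; on extract_code_chunks('a\nb\nc\nd', 2, 2): A raises ValueError, B raises ValueError
import Mathlib
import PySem

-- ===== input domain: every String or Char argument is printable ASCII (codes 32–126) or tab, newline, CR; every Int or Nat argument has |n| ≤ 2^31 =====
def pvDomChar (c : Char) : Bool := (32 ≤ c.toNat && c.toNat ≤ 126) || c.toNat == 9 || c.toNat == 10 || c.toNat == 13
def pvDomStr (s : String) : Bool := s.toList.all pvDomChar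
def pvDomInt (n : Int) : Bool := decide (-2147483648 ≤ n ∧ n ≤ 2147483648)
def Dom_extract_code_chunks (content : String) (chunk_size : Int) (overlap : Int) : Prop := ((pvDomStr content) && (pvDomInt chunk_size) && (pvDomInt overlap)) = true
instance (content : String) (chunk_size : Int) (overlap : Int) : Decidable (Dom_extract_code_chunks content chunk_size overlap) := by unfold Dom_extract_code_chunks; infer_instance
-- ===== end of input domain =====

-- B replaces the per-chunk "\n".join of a list slice by one normalized buffer
-- plus a prefix-offset table, each chunk being a single substring slice (objective: alternative).

-- ===== PORT A =====
def extract_code_chunks (content : String) (chunk_size : Int) (overlap : Int) : List (Int × String) :=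
  let lines := PySem.Str.splitlines content
  if (lines.length : Int) ≤ chunk_size then [(1, content)]
  else
    let step := chunk_size - overlap
    (PySem.List.pyRange 0 (lines.length : Int) step).foldl
      (fun chunks i =>
        chunks ++ [(i + 1,
          PySem.Str.join "\n" (PySem.List.slice lines (some i) (some (i + chunk_size))))])
      []

-- ===== PORT B =====
def extract_code_chunks_alt (content : String) (chunk_size : Int) (overlap : Int) : List (Int × String) :=
  let lines := PySem.Str.splitlines content
  let n := lines.length
  if (n : Int) ≤ chunk_size then [(1, content)]
  else
    -- offsets[k] = start position of line k inside "\n".join(lines); one extra final entry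
    let st := lines.foldl
      (fun (st : List Int × Int) ln => (st.1 ++ [st.2], st.2 + PySem.Str.len ln + 1))
      (([] : List Int), (0 : Int))
    let offs := st.1 ++ [st.2]
    let norm := PySem.Str.join "\n" lines
    let step := chunk_size - overlap
    -- Python indexes offsets[i]/offsets[hi] plainly; both indices are always in range here,
    -- so pyGetD's default is never consulted.
    (PySem.List.pyRange 0 (n : Int) step).foldl
      (fun chunks i =>
        let hi := min (i + chunk_size) (n : Int)
        if hi ≤ i then chunks ++ [(i + 1, "")]
        else chunks ++ [(i + 1,
          PySem.Str.slice norm (some (PySem.List.pyGetD offs i 0))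
            (some (PySem.List.pyGetD offs hi 0 - 1)))])
      []

-- ===== PRECONDITION & SPEC =====
-- Pre_ excludes (a) chunk_size = overlap on content with more lines than chunk_size, where
-- A (and B) raise ValueError from range(..., 0), and (b) negative chunk_size with a positive
-- step on non-empty line lists — outside the function's natural domain (a chunk size is a
-- count ≥ 0) — where A's slice stop i+chunk_size goes negative and Python wraps it from the
-- end of the list.
def Pre_extract_code_chunks (content : String) (chunk_size : Int) (overlap : Int) : Prop :=
  ((PySem.Str.splitlines content).length : Int) ≤ chunk_size ∨
    (chunk_size ≠ overlap ∧
      (0 ≤ chunk_size ∨ chunk_size < overlap ∨ (PySem.Str.splitlines content).length = 0))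
instance (content : String) (chunk_size : Int) (overlap : Int) : Decidable (Pre_extract_code_chunks content chunk_size overlap) := by unfold Pre_extract_code_chunks; infer_instance

def pvWitness_extract_code_chunks : String × Int × Int := ("a\nbb\nc\nd\ne", 3, 1)

def Spec_extract_code_chunks (content : String) (chunk_size : Int) (overlap : Int) (out : List (Int × String)) : Prop := out = extract_code_chunks_alt content chunk_size overlap
instance (content : String) (chunk_size : Int) (overlap : Int) (out : List (Int × String)) : Decidable (Spec_extract_code_chunks content chunk_size overlap out) := by unfold Spec_extract_code_chunks; infer_instance

-- ===== CLAIM (what is proved, stated in full; the proofs are below) =====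
def Claim_equal_extract_code_chunks : Prop := ∀ (content : String) (chunk_size : Int) (overlap : Int), Dom_extract_code_chunks content chunk_size overlap → Pre_extract_code_chunks content chunk_size overlap → Spec_extract_code_chunks content chunk_size overlap (extract_code_chunks content chunk_size overlap)

-- ===== LEMMAS AND PROOFS =====

-- total width of a list of lines inside "\n".join, counting one separator per line
def pvOfs (ls : List (List Char)) : Nat := (ls.map (fun l => l.length + 1)).sum

def pvOfsI (ls : List String) : Int := (ls.map (fun l => PySem.Str.len l + 1)).sum

theorem pvOfsI_eq (ls : List String) : pvOfsI ls = (pvOfs (ls.map String.toList) : Int) := by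
  induction ls with
  | nil => simp [pvOfsI, pvOfs]
  | cons x r ih =>
    simp [pvOfsI, pvOfs, List.sum_cons] at *
    omega

theorem pvOfs_pos {ls : List (List Char)} (h : ls ≠ []) : 1 ≤ pvOfs ls := by
  cases ls with
  | nil => simp at h
  | cons x r => simp [pvOfs, List.sum_cons]; omega

-- the fold in port B builds exactly the prefix-offset table
theorem pvFold_offsets (ls : List String) (acc : List Int) (pos : Int) :
    ls.foldl (fun (st : List Int × Int) ln => (st.1 ++ [st.2], st.2 + PySem.Str.len ln + 1)) (acc, pos)
      = (acc ++ (List.range ls.length).map (fun k => pos + pvOfsI (ls.take k)), pos + pvOfsI ls) := by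
  induction ls generalizing acc pos with
  | nil => simp [pvOfsI]
  | cons x r ih =>
    simp only [List.foldl_cons, ih]
    refine Prod.ext ?_ ?_
    · show acc ++ [pos] ++ _ = acc ++ _
      rw [List.length_cons, List.range_succ_eq_map, List.map_cons, List.map_map, List.append_assoc]
      congr 1
      simp [pvOfsI, List.sum_cons]
      intro a _
      ring
    · simp [pvOfsI, List.sum_cons]; ring

-- dropping the first i lines (with separators) of the joined buffer
theorem pvJoin_drop (ls : List (List Char)) (i : Nat) :
    (PySem.Chars.join ['\n'] ls).drop (pvOfs (ls.take i)) = PySem.Chars.join ['\n'] (ls.drop i) := by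
  induction ls generalizing i with
  | nil => simp [pvOfs, PySem.Chars.join_nil]
  | cons x r ih =>
    cases i with
    | zero => simp [pvOfs]
    | succ k =>
      rw [List.take_succ_cons, List.drop_succ_cons]
      have hofs : pvOfs (x :: r.take k) = x.length + 1 + pvOfs (r.take k) := by
        simp [pvOfs, List.sum_cons]
      cases r with
      | nil =>
        rw [PySem.Chars.join_singleton, hofs, List.drop_eq_nil_of_le (by omega)]
        simp [PySem.Chars.join_nil]
      | cons y r' =>
        rw [PySem.Chars.join_cons_cons, hofs, List.append_assoc, List.drop_append,
          List.drop_eq_nil_of_le (by omega : x.length ≤ x.length + 1 + pvOfs ((y :: r').take k)),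
          List.nil_append, List.singleton_append,
          show x.length + 1 + pvOfs ((y :: r').take k) - x.length = pvOfs ((y :: r').take k) + 1 by omega,
          List.drop_succ_cons]
        exact ih k

-- taking the first e lines of the joined buffer
theorem pvJoin_take (ls : List (List Char)) (e : Nat) (he : 0 < e) :
    (PySem.Chars.join ['\n'] ls).take (pvOfs (ls.take e) - 1) = PySem.Chars.join ['\n'] (ls.take e) := by
  induction ls generalizing e with
  | nil => simp [pvOfs, PySem.Chars.join_nil]
  | cons x r ih =>
    obtain ⟨k, rfl⟩ : ∃ k, e = k + 1 := ⟨e - 1, by omega⟩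
    rw [List.take_succ_cons]
    have hofs : pvOfs (x :: r.take k) = x.length + 1 + pvOfs (r.take k) := by
      simp [pvOfs, List.sum_cons]
    cases r with
    | nil =>
      rw [PySem.Chars.join_singleton]
      simp [pvOfs, PySem.Chars.join_singleton]
    | cons y r' =>
      rw [PySem.Chars.join_cons_cons, hofs]
      cases k with
      | zero =>
        simp only [List.take_zero, pvOfs, List.map_nil, List.sum_nil, Nat.add_zero,
          Nat.add_sub_cancel]
        rw [List.append_assoc, List.take_left']
        · exact (PySem.Chars.join_singleton _ _).symm
        · rfl
      | succ k' =>
        have hpos : 1 ≤ pvOfs ((y :: r').take (k' + 1)) := pvOfs_pos (by simp)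
        rw [show x.length + 1 + pvOfs ((y :: r').take (k' + 1)) - 1
              = x.length + (1 + (pvOfs ((y :: r').take (k' + 1)) - 1)) by omega]
        rw [List.append_assoc, List.take_append, List.take_of_length_le (by omega),
          show x.length + (1 + (pvOfs ((y :: r').take (k' + 1)) - 1)) - x.length
              = 1 + (pvOfs ((y :: r').take (k' + 1)) - 1) by omega,
          List.singleton_append,
          show 1 + (pvOfs ((y :: r').take (k' + 1)) - 1) = (pvOfs ((y :: r').take (k' + 1)) - 1) + 1 by omega,
          List.take_succ_cons, ih (k' + 1) (by omega)]
        have : (y :: r').take (k' + 1) = y :: r'.take k' := List.take_succ_cons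
        rw [this, PySem.Chars.join_cons_cons]
        simp

theorem pvOfs_split (ls : List (List Char)) (i e : Nat) (hie : i ≤ e) :
    pvOfs (ls.take e) = pvOfs (ls.take i) + pvOfs ((ls.drop i).take (e - i)) := by
  have h : ls.take e = ls.take i ++ (ls.drop i).take (e - i) := by
    rw [← List.take_add]
    congr 1
    omega
  rw [h, pvOfs, List.map_append, List.sum_append]
  rfl

-- slicing the joined buffer between line offsets = joining the line slice
theorem pvChunk (ls : List (List Char)) (i e : Nat) (hie : i < e) (hen : e ≤ ls.length) :
    PySem.Chars.slice (PySem.Chars.join ['\n'] ls)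
        (some (pvOfs (ls.take i) : Int)) (some ((pvOfs (ls.take e) : Int) - 1))
      = PySem.Chars.join ['\n'] ((ls.drop i).take (e - i)) := by
  have hne : ls.take e ≠ [] := by
    intro h
    rcases List.take_eq_nil_iff.1 h with h0 | h0
    · omega
    · rw [h0] at hen; simp at hen; omega
  have hpos : 1 ≤ pvOfs (ls.take e) := pvOfs_pos hne
  have hb : ((pvOfs (ls.take e) : Int) - 1) = ((pvOfs (ls.take e) - 1 : Nat) : Int) := by omega
  rw [PySem.Chars.slice_eq_listSlice, hb, PySem.List.slice_natCast, pvJoin_drop]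
  have hdpos : 1 ≤ pvOfs ((ls.drop i).take (e - i)) := pvOfs_pos (by
    intro h
    rcases List.take_eq_nil_iff.1 h with h0 | h0
    · omega
    · have := List.drop_eq_nil_iff.1 h0; omega)
  rw [show pvOfs (ls.take e) - 1 - pvOfs (ls.take i) = pvOfs ((ls.drop i).take (e - i)) - 1 by
    have := pvOfs_split ls i e (by omega)
    omega]
  exact pvJoin_take (ls.drop i) (e - i) (by omega)

theorem pvMem_pyRange_zero {n : Nat} {step i : Int} (h : i ∈ PySem.List.pyRange 0 (n : Int) step) :
    0 ≤ i ∧ i < (n : Int) ∧ 0 < step := by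
  rcases lt_trichotomy step 0 with hs | hs | hs
  · simp [PySem.List.pyRange, show ¬ step = 0 by omega, show ¬ 0 < step by omega,
      show ¬ ((n : Int) < 0) by omega] at h
  · simp [PySem.List.pyRange, hs] at h
  · rcases (PySem.List.mem_pyRange_iff_of_pos hs i).1 h with ⟨h1, h2, _⟩
    exact ⟨h1, h2, hs⟩

-- looking up the offset table built by B's fold
theorem pvOffs_lookup (lines : List String) (j : Int) (hj : 0 ≤ j) (hjn : j ≤ (lines.length : Int)) :
    PySem.List.pyGetD
      ((List.range lines.length).map (fun k => (0 : Int) + pvOfsI (lines.take k)) ++ [0 + pvOfsI lines]) j 0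
      = pvOfsI (lines.take j.toNat) := by
  rw [PySem.List.pyGetD_of_nonneg _ _ hj]
  rcases eq_or_lt_of_le hjn with he | hlt
  · have hjt : j.toNat = lines.length := by omega
    rw [hjt, List.getD_eq_getElem?_getD]
    simp [List.take_length]
  · have hjt : j.toNat < lines.length := by omega
    rw [List.getD_eq_getElem?_getD, List.getElem?_append_left (by simpa using hjt)]
    simp [hjt]

-- ===== VERDICT (by name: the statement is the Claim_ definition above) =====
theorem extract_code_chunks_spec : Claim_equal_extract_code_chunks := by
  intro content cs ov _ hpre
  unfold Spec_extract_code_chunks extract_code_chunks extract_code_chunks_alt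
  set lines := PySem.Str.splitlines content with hlines
  by_cases hsmall : ((lines.length : Int) ≤ cs)
  · simp [hsmall]
  · simp only [if_neg hsmall]
    have hcs : 0 ≤ cs ∨ cs < ov ∨ (lines.length : Int) = 0 := by
      rcases hpre with h | h
      · exact absurd h hsmall
      · simpa using h.2
    rw [pvFold_offsets]
    refine PySem.List.foldl_congr_mem _ _ _ _ ?_
    intro acc i hi
    obtain ⟨hi0, hin, hstep⟩ := pvMem_pyRange_zero hi
    by_cases hempty : min (i + cs) (lines.length : Int) ≤ i
    · -- chunk_size = 0: both sides produce the empty chunk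
      have hcs0 : cs = 0 := by
        rcases hcs with h | h | h <;> omega
      simp only [hcs0, add_zero]
      rw [PySem.List.slice_toNat _ hi0 hi0]
      simp
      apply String.toList_inj.1
      rw [PySem.Str.toList_join]
      simp [PySem.Chars.join_nil]
    · simp only [if_neg hempty]
      congr 2
      set hi' := min (i + cs) (lines.length : Int) with hhi
      have hhi0 : 0 ≤ hi' := by omega
      have hhin : hi' ≤ (lines.length : Int) := by omega
      have hiltn : i < hi' := by omega
      simp only [List.nil_append]
      rw [pvOffs_lookup lines i hi0 (by omega), pvOffs_lookup lines hi' hhi0 hhin]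
      congr 1
      apply String.toList_inj.1
      rw [PySem.Str.toList_join, PySem.Str.toList_slice, PySem.Str.toList_join]
      rw [pvOfsI_eq, pvOfsI_eq, List.map_take, List.map_take]
      set L := lines.map String.toList with hL
      have hLlen : L.length = lines.length := by simp [hL]
      simp only [show ("\n" : String).toList = ['\n'] from rfl]
      rw [pvChunk L i.toNat hi'.toNat (by omega) (by omega)]
      -- A's chunk: the list slice, truncation folded into the take
      rw [PySem.List.slice_toNat _ hi0 (by omega), List.map_take, List.map_drop]
      congr 1
      rw [List.take_eq_take_iff]
      simp
      omega
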